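-- pv_equiv track=rewrite | github.com/Insania27/config2 | main.py | bfs_recursive_levels
-- ===== SOURCE A (Python) =====
-- def bfs_recursive_levels(start, graph, max_depth, filter_substr):
--     visited = set()
--     levels = []
--
--     if filter_substr and filter_substr in start:
--         return visited, levels
--
--     levels.append([start])
--     visited.add(start)
--
--     def recurse(frontier, depth):
--         if depth >= max_depth:
--             return
--         next_frontier = []
--         for node in frontier:
--             for nbr in graph.get(node, []):
--                 if filter_substr and filter_substr in nbr:
--                     continue
--                 if nbr not in visited:
--                     visited.add(nbr)
--                     next_frontier.append(nbr)
--         if next_frontier: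
--             levels.append(next_frontier)
--             recurse(next_frontier, depth + 1)
--
--     recurse(levels[0], 0)
--     return visited, levels
-- ===== SOURCE B (Python) =====
-- def bfs_recursive_levels(start, graph, max_depth, filter_substr):
--     # Single FIFO queue of (node, depth) pairs instead of per-level recursion;
--     # levels are grouped by the depth tag carried on each queued node.
--     def allowed(s):
--         return not filter_substr or filter_substr not in s
--
--     if not allowed(start):
--         return set(), []
--     visited = {start}
--     levels = [[start]]
--     queue = [(start, 0)]
--     i = 0
--     while i < len(queue):
--         node, depth = queue[i]
--         i += 1
--         if depth >= max_depth:
--             continue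
--         for nbr in graph.get(node, []):
--             if allowed(nbr) and nbr not in visited:
--                 visited.add(nbr)
--                 if len(levels) == depth + 1:
--                     levels.append([])
--                 levels[depth + 1].append(nbr)
--                 queue.append((nbr, depth + 1))
--     return visited, levels
-- ===== Notes on version B (the rewrite author's own statement) =====
-- stated objective: alternative
-- what changed: Replaces A's recursive level-by-level frontier expansion with a single FIFO queue of (node, depth) pairs scanned by index, grouping nodes into levels via the depth tag carried on each queued node instead of rebuilding a next_frontier list per level.
import Mathlib
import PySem

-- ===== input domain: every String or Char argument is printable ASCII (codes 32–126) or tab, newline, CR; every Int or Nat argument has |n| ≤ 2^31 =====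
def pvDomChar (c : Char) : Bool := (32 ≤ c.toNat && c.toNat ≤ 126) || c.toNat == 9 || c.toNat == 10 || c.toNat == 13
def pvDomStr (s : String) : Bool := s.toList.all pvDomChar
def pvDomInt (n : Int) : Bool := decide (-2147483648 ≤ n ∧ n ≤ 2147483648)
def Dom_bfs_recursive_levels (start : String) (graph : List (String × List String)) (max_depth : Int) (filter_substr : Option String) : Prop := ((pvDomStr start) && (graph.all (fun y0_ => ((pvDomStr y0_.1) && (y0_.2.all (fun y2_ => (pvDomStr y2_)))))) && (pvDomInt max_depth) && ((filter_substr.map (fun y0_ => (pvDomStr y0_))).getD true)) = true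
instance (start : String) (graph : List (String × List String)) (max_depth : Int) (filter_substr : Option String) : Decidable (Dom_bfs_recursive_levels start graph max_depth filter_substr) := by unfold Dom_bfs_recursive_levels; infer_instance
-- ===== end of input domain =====

-- B replaces A's recursive per-level expansion by a single FIFO queue of (node, depth)
-- pairs, grouping nodes into levels via the depth tag (objective: alternative; same cost).

-- ===== PORT A =====
-- 'filter_substr and filter_substr in nbr' : falsy when None or "" (Python truthiness)
def pvFilteredA (filter_substr : Option String) (s : String) : Bool :=
  match filter_substr with
  | none => false
  | some f => (!(f == "")) && PySem.Str.isIn f s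

-- the inner 'for nbr in graph.get(node, [])' body, state = (visited, next_frontier)
def pvStepA (filter_substr : Option String) (st : PySem.Set String × List String) (nbr : String) :
    PySem.Set String × List String :=
  if pvFilteredA filter_substr nbr then st
  else if PySem.Set.contains st.1 nbr then st
  else (PySem.Set.add st.1 nbr, st.2 ++ [nbr])

-- 'recurse(frontier, depth)'; the terminating test 'depth >= max_depth' is fueled as
-- fuel = (max_depth - depth).toNat, so fuel = 0 exactly when depth >= max_depth
def pvRecurseA (g : PySem.Dict String (List String)) (filter_substr : Option String) :
    Nat → List String → PySem.Set String → List (List String) →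
    PySem.Set String × List (List String)
  | 0, _, visited, levels => (visited, levels)
  | fuel + 1, frontier, visited, levels =>
      let st := frontier.foldl
        (fun st node => (PySem.Dict.getD g node []).foldl (pvStepA filter_substr) st)
        (visited, [])
      if st.2 = [] then (st.1, levels)
      else pvRecurseA g filter_substr fuel st.2 st.1 (levels ++ [st.2])

def bfs_recursive_levels (start : String) (graph : List (String × List String)) (max_depth : Int) (filter_substr : Option String) : List String × List (List String) :=
  if pvFilteredA filter_substr start then (PySem.Set.empty, [])
  else
    pvRecurseA (PySem.Dict.ofList graph) filter_substr max_depth.toNat [start]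
      (PySem.Set.add PySem.Set.empty start) [[start]]

-- ===== PORT B =====
-- 'not filter_substr or filter_substr not in s' (Source B's allowed)
def pvAllowedB (filter_substr : Option String) (s : String) : Bool :=
  match filter_substr with
  | none => true
  | some fs => (fs == "") || !PySem.Str.isIn fs s

-- 'if len(levels) == depth + 1: levels.append([])' then 'levels[depth + 1].append(nbr)';
-- the index depth+1 is always in range here (BFS processes depths in order), where List.modify is exact
def pvPlaceB (levels : List (List String)) (depth : Int) (nbr : String) : List (List String) :=
  (if (levels.length : Int) == depth + 1 then levels ++ [[]] else levels).modify
    (depth + 1).toNat (fun lvl => lvl ++ [nbr])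

-- body of 'for nbr in graph.get(node, [])', state = (visited, levels, enqueued pairs)
def pvNbrStepB (filter_substr : Option String) (depth : Int)
    (st : PySem.Set String × List (List String) × List (String × Int)) (nbr : String) :
    PySem.Set String × List (List String) × List (String × Int) :=
  if pvAllowedB filter_substr nbr && !PySem.Set.contains st.1 nbr then
    (PySem.Set.add st.1 nbr, pvPlaceB st.2.1 depth nbr, st.2.2 ++ [(nbr, depth + 1)])
  else st

-- 'while i < len(queue)': the unread tail of the queue is the pending list; appends go to
-- its end. The loop needs no bound in Python; here it is fueled with 1 + the total number
-- of neighbour entries, which the proof shows is never exhausted (each dequeued node was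
-- enqueued exactly once, all of them distinct).
def pvWhileB (g : PySem.Dict String (List String)) (filter_substr : Option String) (maxd : Int) :
    Nat → List (String × Int) → PySem.Set String → List (List String) →
    PySem.Set String × List (List String)
  | _, [], visited, levels => (visited, levels)
  | 0, _ :: _, visited, levels => (visited, levels)
  | fuel + 1, (node, depth) :: rest, visited, levels =>
      if maxd ≤ depth then pvWhileB g filter_substr maxd fuel rest visited levels
      else
        let st := (PySem.Dict.getD g node []).foldl (pvNbrStepB filter_substr depth)
          (visited, levels, ([] : List (String × Int)))
        pvWhileB g filter_substr maxd fuel (rest ++ st.2.2) st.1 st.2.1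

def bfs_recursive_levels_alt (start : String) (graph : List (String × List String)) (max_depth : Int) (filter_substr : Option String) : List String × List (List String) :=
  if !pvAllowedB filter_substr start then (PySem.Set.empty, [])
  else
    pvWhileB (PySem.Dict.ofList graph) filter_substr max_depth
      ((graph.flatMap (fun p => p.2)).length + 1) [(start, 0)]
      (PySem.Set.add PySem.Set.empty start) [[start]]

-- ===== PRECONDITION & SPEC =====
def Spec_bfs_recursive_levels (start : String) (graph : List (String × List String)) (max_depth : Int) (filter_substr : Option String) (out : List String × List (List String)) : Prop := out = bfs_recursive_levels_alt start graph max_depth filter_substr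
instance (start : String) (graph : List (String × List String)) (max_depth : Int) (filter_substr : Option String) (out : List String × List (List String)) : Decidable (Spec_bfs_recursive_levels start graph max_depth filter_substr out) := by unfold Spec_bfs_recursive_levels; infer_instance

-- ===== CLAIM (what is proved, stated in full; the proofs are below) =====
def Claim_equal_bfs_recursive_levels : Prop := ∀ (start : String) (graph : List (String × List String)) (max_depth : Int) (filter_substr : Option String), Dom_bfs_recursive_levels start graph max_depth filter_substr → Spec_bfs_recursive_levels start graph max_depth filter_substr (bfs_recursive_levels start graph max_depth filter_substr)

-- ===== LEMMAS AND PROOFS =====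

-- the partially built next level as it sits at the end of B's levels list
def pvMk (a : List String) : List (List String) := if a = [] then [] else [a]

-- how many elements of U are not yet visited (bounds B's future enqueues)
def pvUnvis (U : List String) (v : PySem.Set String) : Nat :=
  U.countP (fun x => !PySem.Set.contains v x)

theorem pvAllowedB_not_filteredA (f : Option String) (s : String) :
    pvAllowedB f s = !pvFilteredA f s := by
  cases f with
  | none => rfl
  | some fs => simp [pvAllowedB, pvFilteredA, Bool.not_and]

theorem pvModify_last (l : List (List String)) (a : List String) (f : List String → List String) :
    (l ++ [a]).modify l.length f = l ++ [f a] := by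
  induction l with
  | nil => simp
  | cons x xs ih => simpa [List.modify_succ_cons] using ih

theorem pvPlaceB_eq (ls : List (List String)) (acc : List String) (d : Int) (nbr : String)
    (hd : 0 ≤ d) (hlen : (ls.length : Int) = d + 1) :
    pvPlaceB (ls ++ pvMk acc) d nbr = ls ++ [acc ++ [nbr]] := by
  unfold pvPlaceB pvMk
  have h2 : (d + 1).toNat = ls.length := by omega
  by_cases ha : acc = []
  · subst ha
    simp only [if_pos rfl, List.append_nil, hlen, BEq.rfl, if_pos, h2]
    simpa using pvModify_last ls [] (fun lvl => lvl ++ [nbr])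
  · have h1 : ((((ls ++ [acc]).length : Nat) : Int) == d + 1) = false := by
      simp only [List.length_append, List.length_cons, List.length_nil, beq_eq_false_iff_ne,
        ne_eq]
      push_cast
      omega
    simp only [if_neg ha, h1, Bool.false_eq_true, if_false, h2]
    exact pvModify_last ls acc (fun lvl => lvl ++ [nbr])

theorem pvFoldAcc (f : Option String) (l : List String) :
    ∀ (v : PySem.Set String) (acc : List String),
    l.foldl (pvStepA f) (v, acc)
      = ((l.foldl (pvStepA f) (v, [])).1, acc ++ (l.foldl (pvStepA f) (v, [])).2) := by
  induction l with
  | nil => intro v acc; simp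
  | cons x xs ih =>
      intro v acc
      simp only [List.foldl_cons]
      by_cases h1 : pvFilteredA f x
      · simp [pvStepA, h1, ih v acc]
      · by_cases h2 : x ∈ v
        · simp [pvStepA, h1, h2, ih v acc]
        · simp only [pvStepA, h1, Bool.false_eq_true, if_false,
            PySem.Set.contains_eq_listContains, List.contains_eq_mem, decide_eq_true_eq, h2]
          rw [ih (PySem.Set.add v x) (acc ++ [x]), ih (PySem.Set.add v x) ([] ++ [x])]
          simp

theorem pvNbrs (f : Option String) (d : Int) (l : List String) :
    ∀ (v : PySem.Set String) (acc : List String) (ls : List (List String))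
      (p₀ : List (String × Int)), 0 ≤ d → (ls.length : Int) = d + 1 →
    l.foldl (pvNbrStepB f d) (v, ls ++ pvMk acc, p₀)
      = ((l.foldl (pvStepA f) (v, [])).1,
         ls ++ pvMk (acc ++ (l.foldl (pvStepA f) (v, [])).2),
         p₀ ++ ((l.foldl (pvStepA f) (v, [])).2).map (fun x => (x, d + 1))) := by
  induction l with
  | nil => intro v acc ls p₀ hd hlen; simp
  | cons x xs ih =>
      intro v acc ls p₀ hd hlen
      simp only [List.foldl_cons]
      by_cases h1 : pvFilteredA f x
      · simp only [pvNbrStepB, pvStepA, pvAllowedB_not_filteredA, h1, Bool.not_true,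
          Bool.false_and, Bool.false_eq_true, if_false, if_pos rfl]
        exact ih v acc ls p₀ hd hlen
      · by_cases h2 : x ∈ v
        · have hc : PySem.Set.contains v x = true := by
            simp [PySem.Set.contains_eq_listContains, List.contains_eq_mem, h2]
          simp only [pvNbrStepB, pvStepA, pvAllowedB_not_filteredA, h1, hc, Bool.not_true,
            Bool.and_false, Bool.false_eq_true, if_false,
            PySem.Set.contains_eq_listContains, List.contains_eq_mem, decide_eq_true_eq, h2,
            if_pos rfl]
          exact ih v acc ls p₀ hd hlen
        · have hc : PySem.Set.contains v x = false := by
            simp [PySem.Set.contains_eq_listContains, List.contains_eq_mem, h2]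
          have h1' : pvFilteredA f x = false := by simpa using h1
          simp only [pvNbrStepB, pvStepA, pvAllowedB_not_filteredA, h1', hc, Bool.not_false,
            Bool.true_and, Bool.false_eq_true, if_false, ite_true,
            PySem.Set.contains_eq_listContains, List.contains_eq_mem, decide_eq_true_eq, h2]
          rw [pvPlaceB_eq ls acc d x hd hlen]
          have hne : acc ++ [x] ≠ [] := by simp
          have hmk : ls ++ [acc ++ [x]] = ls ++ pvMk (acc ++ [x]) := by simp [pvMk, hne]
          rw [hmk, ih (PySem.Set.add v x) (acc ++ [x]) ls (p₀ ++ [(x, d + 1)]) hd hlen]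
          rw [pvFoldAcc f xs (PySem.Set.add v x) ([] ++ [x])]
          simp [pvMk]

theorem pvContains_add (v : PySem.Set String) (x y : String) :
    PySem.Set.contains (PySem.Set.add v x) y = (PySem.Set.contains v y || y == x) := by
  simp only [PySem.Set.contains_eq_listContains, PySem.Set.add_eq_ite]
  by_cases h : x ∈ v
  · simp only [if_pos h, List.contains_eq_mem]
    by_cases hy : y = x
    · subst hy; simp [h]
    · simp [hy]
  · simp [if_neg h, List.contains_eq_mem]
    tauto

theorem pvCountStrict (U : List String) (v : PySem.Set String) (x : String)
    (hx : x ∈ U) (hv : PySem.Set.contains v x = false) :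
    pvUnvis U (PySem.Set.add v x) + 1 ≤ pvUnvis U v := by
  unfold pvUnvis
  induction U with
  | nil => cases hx
  | cons u U' ih =>
      have hmono : U'.countP (fun y => !PySem.Set.contains (PySem.Set.add v x) y)
          ≤ U'.countP (fun y => !PySem.Set.contains v y) := by
        apply List.countP_mono_left
        intro a _ ha
        simp only [pvContains_add, Bool.not_or, Bool.and_eq_true] at ha
        exact ha.1
      simp only [List.countP_cons]
      by_cases hu : u = x
      · subst hu
        have h1 : (!(PySem.Set.contains (PySem.Set.add v u) u)) = false := by
          simp [pvContains_add]
        have h2 : (!PySem.Set.contains v u) = true := by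
          simp only [hv, Bool.not_false]
        rw [h1, h2]
        simp only [Bool.false_eq_true, if_false]
        simp only [if_pos]
        omega
      · have hx' : x ∈ U' := by
          cases hx with
          | head => exact absurd rfl hu
          | tail _ h => exact h
        have hih := ih hx'
        have h3 : (!(PySem.Set.contains (PySem.Set.add v x) u)) = (!PySem.Set.contains v u) := by
          have huf : (u == x) = false := by simp [hu]
          rw [pvContains_add, huf, Bool.or_false]
        rw [h3]
        split_ifs <;> omega

theorem pvCountNbrs (f : Option String) (U : List String) (l : List String)
    (hU : ∀ x ∈ l, x ∈ U) : ∀ (v : PySem.Set String),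
    pvUnvis U (l.foldl (pvStepA f) (v, [])).1 + ((l.foldl (pvStepA f) (v, [])).2).length
      ≤ pvUnvis U v := by
  induction l with
  | nil => intro v; simp
  | cons x xs ih =>
      intro v
      have hxU : x ∈ U := hU x (by simp)
      have hU' : ∀ y ∈ xs, y ∈ U := fun y hy => hU y (by simp [hy])
      simp only [List.foldl_cons]
      by_cases h1 : pvFilteredA f x
      · simpa [pvStepA, h1] using ih hU' v
      · by_cases h2 : x ∈ v
        · simpa [pvStepA, h1, h2] using ih hU' v
        · have hv : PySem.Set.contains v x = false := by
            simp [PySem.Set.contains_eq_listContains, List.contains_eq_mem, h2]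
          simp only [pvStepA, h1, Bool.false_eq_true, if_false,
            PySem.Set.contains_eq_listContains, List.contains_eq_mem, decide_eq_true_eq, h2]
          rw [pvFoldAcc f xs (PySem.Set.add v x) ([] ++ [x])]
          have h3 := ih hU' (PySem.Set.add v x)
          have h4 := pvCountStrict U v x hxU hv
          simp only [List.length_append, List.nil_append, List.length_cons, List.length_nil]
          omega

theorem pvPhaseAcc (g : PySem.Dict String (List String)) (f : Option String)
    (front : List String) : ∀ (v : PySem.Set String) (acc : List String),
    front.foldl (fun st node => (PySem.Dict.getD g node []).foldl (pvStepA f) st) (v, acc)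
      = ((front.foldl
            (fun st node => (PySem.Dict.getD g node []).foldl (pvStepA f) st) (v, [])).1,
         acc ++ (front.foldl
            (fun st node => (PySem.Dict.getD g node []).foldl (pvStepA f) st) (v, [])).2) := by
  induction front with
  | nil => intro v acc; simp
  | cons node rest ih =>
      intro v acc
      simp only [List.foldl_cons]
      rw [pvFoldAcc f (PySem.Dict.getD g node []) v acc,
        pvFoldAcc f (PySem.Dict.getD g node []) v []]
      rw [ih _ (acc ++ _), ih _ ([] ++ _)]
      simp

theorem pvCountPhase (g : PySem.Dict String (List String)) (f : Option String) (U : List String)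
    (hU : ∀ (node : String), ∀ x ∈ PySem.Dict.getD g node [], x ∈ U) (front : List String) :
    ∀ (v : PySem.Set String),
    pvUnvis U ((front.foldl
        (fun st node => (PySem.Dict.getD g node []).foldl (pvStepA f) st) (v, [])).1)
      + ((front.foldl
        (fun st node => (PySem.Dict.getD g node []).foldl (pvStepA f) st) (v, [])).2).length
      ≤ pvUnvis U v := by
  induction front with
  | nil => intro v; simp
  | cons node rest ih =>
      intro v
      simp only [List.foldl_cons]
      rw [pvFoldAcc f (PySem.Dict.getD g node []) v []]
      rw [pvPhaseAcc g f rest _ ([] ++ _)]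
      have h1 := pvCountNbrs f U (PySem.Dict.getD g node []) (hU node) v
      have h2 := ih ((PySem.Dict.getD g node []).foldl (pvStepA f) (v, [])).1
      simp only [List.nil_append, List.length_append]
      omega

theorem pvValuesFold (ps : List (String × List String)) :
    ∀ (d : PySem.Dict String (List String)) (w : List String),
    w ∈ (ps.foldl (fun d p => d.insert p.1 p.2) d).values → w ∈ d.values ∨ w ∈ ps.map (fun p => p.2) := by
  induction ps with
  | nil => intro d w h; exact Or.inl h
  | cons p rest ih =>
      intro d w h
      simp only [List.foldl_cons] at h
      rcases ih (d.insert p.1 p.2) w h with h' | h'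
      · rcases PySem.Dict.mem_values_insert d p.1 p.2 w h' with h'' | h''
        · exact Or.inr (by simp [h''])
        · exact Or.inl h''
      · exact Or.inr (by simp [List.mem_map] at h' ⊢; tauto)

theorem pvMemU (graph : List (String × List String)) (node x : String)
    (hx : x ∈ PySem.Dict.getD (PySem.Dict.ofList graph) node []) :
    x ∈ graph.flatMap (fun p => p.2) := by
  rw [PySem.Dict.getD_eq_get?_getD] at hx
  cases hget : PySem.Dict.get? (PySem.Dict.ofList graph) node with
  | none => rw [hget] at hx; simp at hx
  | some w =>
      rw [hget] at hx
      simp only [Option.getD_some] at hx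
      have hw : w ∈ (PySem.Dict.ofList graph).values := by
        have := PySem.Dict.mem_items_of_get?_eq_some _ hget
        simp only [PySem.Dict.values]
        exact List.mem_map_of_mem this
      have : PySem.Dict.ofList graph = graph.foldl (fun d p => d.insert p.1 p.2) PySem.Dict.empty := rfl
      rw [this] at hw
      rcases pvValuesFold graph PySem.Dict.empty w hw with h | h
      · simp [PySem.Dict.empty, PySem.Dict.values] at h
      · rcases List.mem_map.mp h with ⟨p, hp, rfl⟩
        exact List.mem_flatMap.mpr ⟨p, hp, hx⟩

theorem pvDrain (g : PySem.Dict String (List String)) (f : Option String) (maxd : Int)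
    (pending : List (String × Int)) : ∀ (fuel : Nat) (v : PySem.Set String)
    (ls : List (List String)), (∀ p ∈ pending, maxd ≤ p.2) → pending.length ≤ fuel →
    pvWhileB g f maxd fuel pending v ls = (v, ls) := by
  induction pending with
  | nil => intro fuel v ls _ _; cases fuel <;> rfl
  | cons p rest ih =>
      intro fuel v ls hall hlen
      match fuel with
      | 0 => simp at hlen
      | fu + 1 =>
          obtain ⟨node, d⟩ := p
          have hd : maxd ≤ d := hall (node, d) (by simp)
          simp only [pvWhileB, if_pos hd]
          exact ih fu v ls (fun q hq => hall q (by simp [hq])) (by simp at hlen; omega)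

theorem pvPhase (g : PySem.Dict String (List String)) (f : Option String) (maxd d : Int)
    (hd : 0 ≤ d) (hlt : d < maxd) (front : List String) :
    ∀ (v : PySem.Set String) (acc : List String) (ls : List (List String)) (fuel : Nat),
      (ls.length : Int) = d + 1 → front.length ≤ fuel →
    pvWhileB g f maxd fuel
        (front.map (fun x => (x, d)) ++ acc.map (fun x => (x, d + 1))) v (ls ++ pvMk acc)
      = pvWhileB g f maxd (fuel - front.length)
          (((front.foldl
              (fun st node => (PySem.Dict.getD g node []).foldl (pvStepA f) st) (v, acc)).2).map
            (fun x => (x, d + 1)))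
          ((front.foldl
              (fun st node => (PySem.Dict.getD g node []).foldl (pvStepA f) st) (v, acc)).1)
          (ls ++ pvMk ((front.foldl
              (fun st node => (PySem.Dict.getD g node []).foldl (pvStepA f) st) (v, acc)).2)) := by
  induction front with
  | nil => intro v acc ls fuel _ _; simp
  | cons node rest ih =>
      intro v acc ls fuel hlen hfuel
      match fuel with
      | 0 => simp at hfuel
      | fu + 1 =>
          have hnle : ¬ maxd ≤ d := not_le.mpr hlt
          simp only [List.map_cons, List.cons_append, pvWhileB, if_neg hnle]
          rw [pvNbrs f d (PySem.Dict.getD g node []) v acc ls [] hd hlen]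
          simp only [List.nil_append]
          have hre : (rest.map (fun x => (x, d)) ++ acc.map (fun x => (x, d + 1)))
                ++ ((PySem.Dict.getD g node []).foldl (pvStepA f) (v, [])).2.map
                  (fun x => (x, d + 1))
              = rest.map (fun x => (x, d))
                ++ (acc ++ ((PySem.Dict.getD g node []).foldl (pvStepA f) (v, [])).2).map
                  (fun x => (x, d + 1)) := by
            simp [List.append_assoc]
          rw [hre]
          rw [ih ((PySem.Dict.getD g node []).foldl (pvStepA f) (v, [])).1
            (acc ++ ((PySem.Dict.getD g node []).foldl (pvStepA f) (v, [])).2) ls fu hlen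
            (by simp at hfuel; omega)]
          have hg : (rest.foldl
                (fun st node => (PySem.Dict.getD g node []).foldl (pvStepA f) st)
                (((PySem.Dict.getD g node []).foldl (pvStepA f) (v, [])).1,
                 acc ++ ((PySem.Dict.getD g node []).foldl (pvStepA f) (v, [])).2))
              = ((node :: rest).foldl
                (fun st node => (PySem.Dict.getD g node []).foldl (pvStepA f) st) (v, acc)) := by
            simp only [List.foldl_cons]
            rw [pvFoldAcc f (PySem.Dict.getD g node []) v acc]
          rw [hg]
          simp only [List.length_cons]
          congr 1
          omega

theorem pvMain (g : PySem.Dict String (List String)) (f : Option String) (maxd : Int)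
    (U : List String) (hU : ∀ (node : String), ∀ x ∈ PySem.Dict.getD g node [], x ∈ U) :
    ∀ (n : Nat) (d : Int) (front : List String) (v : PySem.Set String)
      (ls : List (List String)) (fuel : Nat), 0 ≤ d → (maxd - d).toNat = n →
      (ls.length : Int) = d + 1 → front.length + pvUnvis U v ≤ fuel →
    pvWhileB g f maxd fuel (front.map (fun x => (x, d))) v ls = pvRecurseA g f n front v ls := by
  intro n
  induction n with
  | zero =>
      intro d front v ls fuel hd hn hlen hfuel
      have hle : maxd ≤ d := by omega
      rw [show pvRecurseA g f 0 front v ls = (v, ls) from rfl]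
      apply pvDrain
      · intro p hp
        rcases List.mem_map.mp hp with ⟨x, _, rfl⟩
        exact hle
      · simp only [List.length_map]
        omega
  | succ m ih =>
      intro d front v ls fuel hd hn hlen hfuel
      have hlt : d < maxd := by omega
      have hphase := pvPhase g f maxd d hd hlt front v [] ls fuel hlen (by omega)
      simp only [List.map_nil, pvMk, ite_true, eq_self_iff_true, List.append_nil] at hphase
      rw [hphase]
      show _ = pvRecurseA g f (m + 1) front v ls
      simp only [pvRecurseA]
      by_cases hnil : (front.foldl
          (fun st node => (PySem.Dict.getD g node []).foldl (pvStepA f) st) (v, [])).2 = []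
      · rw [hnil]
        simp only [List.map_nil, ite_true, eq_self_iff_true, List.append_nil]
        cases hfu : fuel - front.length <;> simp [pvWhileB]
      · simp only [if_neg hnil]
        have hcount := pvCountPhase g f U hU front v
        apply ih (d + 1)
        · omega
        · omega
        · simp only [List.length_append, List.length_cons, List.length_nil]
          push_cast
          omega
        · omega

-- ===== VERDICT (by name: the statement is the Claim_ definition above) =====
theorem bfs_recursive_levels_spec : Claim_equal_bfs_recursive_levels := by
  intro start graph maxd f _
  unfold Spec_bfs_recursive_levels bfs_recursive_levels bfs_recursive_levels_alt
  rw [show (!pvAllowedB f start) = pvFilteredA f start by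
    rw [pvAllowedB_not_filteredA, Bool.not_not]]
  by_cases hb : pvFilteredA f start
  · simp [hb]
  · simp only [hb, if_false, Bool.false_eq_true]
    have := pvMain (PySem.Dict.ofList graph) f maxd (graph.flatMap (fun p => p.2))
      (fun node x hx => pvMemU graph node x hx) maxd.toNat 0 [start]
      (PySem.Set.add PySem.Set.empty start) [[start]]
      ((graph.flatMap (fun p => p.2)).length + 1) le_rfl (by omega) (by simp)
      (by
        have := List.countP_le_length
          (p := fun x => !PySem.Set.contains (PySem.Set.add PySem.Set.empty start) x)
          (l := graph.flatMap (fun p => p.2))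
        simp only [pvUnvis, List.length_cons, List.length_nil]
        omega)
    simpa using this.symm
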